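-- pv_equiv track=rewrite | github.com/ja99/opencode_investigation | report_generator.py | section_header
-- ===== SOURCE A (Python) =====
-- KNOWN_DOMAINS: dict[str, tuple[str, str]] = {
--     "openrouter.ai":                       ("LLM API (configured provider)", "ok"),
--     "api.openai.com":                      ("LLM API (configured provider)", "ok"),
--     "api.anthropic.com":                   ("LLM API (configured provider)", "ok"),
--     "api.groq.com":                        ("LLM API (configured provider)", "ok"),
--     "registry.npmjs.org":                  ("Runtime npm package installs", "warn"),
--     "github.com":                          ("Binary/release download", "warn"),
--     "release-assets.githubusercontent.com": ("GitHub CDN (release assets)", "warn"),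
--     "objects.githubusercontent.com":       ("GitHub CDN (release assets)", "warn"),
--     "models.dev":                          ("Third-party model metadata catalog", "warn"),
--     "opencode.ai":                         ("opencode.ai servers — unexpected", "alert"),
--     "telemetry.opencode.ai":               ("Telemetry endpoint — unexpected", "alert"),
-- }
--
-- RISK_EMOJI: dict[str, str] = {"ok": "✅", "warn": "⚠️", "alert": "🚨"}
--
-- def classify_domain(domain: str) -> tuple[str, str]:
--     """Returns (purpose, risk_level) for a domain."""
--     return KNOWN_DOMAINS.get(domain, ("Unknown / unclassified", "alert"))
--
-- def section_header(log_lines: list[str], domains: dict[str, str]) -> list[str]: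
--     """Summary table of domains contacted."""
--     lines = [
--         "## Network Traffic",
--         "",
--         f"Opencode contacted **{len(domains)} unique domain(s)** during the test session.",
--         "",
--         "| Domain | Purpose | Status |",
--         "|--------|---------|--------|",
--     ]
--     for domain in sorted(domains):
--         purpose, risk = classify_domain(domain)
--         emoji = RISK_EMOJI[risk]
--         lines.append(f"| `{domain}` | {purpose} | {emoji} |")
--
--     get_c = sum(1 for l in log_lines if l.startswith("GET "))
--     post_c = sum(1 for l in log_lines if l.startswith("POST "))
--     con_c = sum(1 for l in log_lines if l.startswith("CONNECT "))
--     err_c = sum(1 for l in log_lines if l.startswith("ERROR "))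
--     lines += [
--         "",
--         f"**Requests**: {len(log_lines)} total — {get_c} GET, {post_c} POST, "
--         f"{con_c} CONNECT tunnels, {err_c} errors",
--     ]
--     return lines
-- ===== SOURCE B (Python) =====
-- KNOWN_DOMAINS: dict[str, tuple[str, str]] = {
--     "openrouter.ai":                       ("LLM API (configured provider)", "ok"),
--     "api.openai.com":                      ("LLM API (configured provider)", "ok"),
--     "api.anthropic.com":                   ("LLM API (configured provider)", "ok"),
--     "api.groq.com":                        ("LLM API (configured provider)", "ok"),
--     "registry.npmjs.org":                  ("Runtime npm package installs", "warn"),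
--     "github.com":                          ("Binary/release download", "warn"),
--     "release-assets.githubusercontent.com": ("GitHub CDN (release assets)", "warn"),
--     "objects.githubusercontent.com":       ("GitHub CDN (release assets)", "warn"),
--     "models.dev":                          ("Third-party model metadata catalog", "warn"),
--     "opencode.ai":                         ("opencode.ai servers — unexpected", "alert"),
--     "telemetry.opencode.ai":               ("Telemetry endpoint — unexpected", "alert"),
-- }
--
-- RISK_EMOJI: dict[str, str] = {"ok": "✅", "warn": "⚠️", "alert": "🚨"}
--
-- def classify_domain(domain: str) -> tuple[str, str]:
--     return KNOWN_DOMAINS.get(domain, ("Unknown / unclassified", "alert"))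
--
-- PREFIXES = ("GET ", "POST ", "CONNECT ", "ERROR ")
--
-- def section_header(log_lines: list[str], domains: dict[str, str]) -> list[str]:
--     """Summary table of domains contacted (single counting pass over log_lines)."""
--     counts = {p: 0 for p in PREFIXES}
--     for line in log_lines:
--         for p in PREFIXES:
--             if line.startswith(p):
--                 counts[p] += 1
--                 break
--     rows = []
--     for domain in sorted(domains):
--         purpose, risk = classify_domain(domain)
--         rows.append(f"| `{domain}` | {purpose} | {RISK_EMOJI[risk]} |")
--     return [
--         "## Network Traffic",
--         "",
--         f"Opencode contacted **{len(domains)} unique domain(s)** during the test session.",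
--         "",
--         "| Domain | Purpose | Status |",
--         "|--------|---------|--------|",
--         *rows,
--         "",
--         f"**Requests**: {len(log_lines)} total — {counts['GET ']} GET, {counts['POST ']} POST, "
--         f"{counts['CONNECT ']} CONNECT tunnels, {counts['ERROR ']} errors",
--     ]
-- ===== Notes on version B (the rewrite author's own statement) =====
-- stated objective: alternative
-- what changed: Replaces A's four separate scans of log_lines (one sum(...) per request prefix) with a single pass maintaining a dict of counters keyed by the prefixes (first matching prefix wins), and builds the result as one spliced list literal instead of repeated appends to a growing list.
import Mathlib
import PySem

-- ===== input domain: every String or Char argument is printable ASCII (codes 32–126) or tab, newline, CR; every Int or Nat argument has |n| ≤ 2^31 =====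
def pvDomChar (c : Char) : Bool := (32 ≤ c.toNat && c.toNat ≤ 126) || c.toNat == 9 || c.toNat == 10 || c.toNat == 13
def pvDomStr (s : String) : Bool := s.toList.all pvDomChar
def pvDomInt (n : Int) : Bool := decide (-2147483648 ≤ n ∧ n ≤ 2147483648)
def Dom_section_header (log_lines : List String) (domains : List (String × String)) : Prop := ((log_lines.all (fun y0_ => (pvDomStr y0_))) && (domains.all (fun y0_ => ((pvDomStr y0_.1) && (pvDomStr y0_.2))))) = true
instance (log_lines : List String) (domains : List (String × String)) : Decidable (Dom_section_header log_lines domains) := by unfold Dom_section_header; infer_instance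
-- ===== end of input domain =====

-- B replaces A's four separate prefix-counting scans of log_lines with one pass over a
-- dict of counters and builds the result as a spliced list instead of repeated appends (objective: alternative).

-- shared module constants / helper (used verbatim by both Pythons)
def pvKnownDomains : PySem.Dict String (String × String) := PySem.Dict.ofList [
  ("openrouter.ai", ("LLM API (configured provider)", "ok")),
  ("api.openai.com", ("LLM API (configured provider)", "ok")),
  ("api.anthropic.com", ("LLM API (configured provider)", "ok")),
  ("api.groq.com", ("LLM API (configured provider)", "ok")),
  ("registry.npmjs.org", ("Runtime npm package installs", "warn")),
  ("github.com", ("Binary/release download", "warn")),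
  ("release-assets.githubusercontent.com", ("GitHub CDN (release assets)", "warn")),
  ("objects.githubusercontent.com", ("GitHub CDN (release assets)", "warn")),
  ("models.dev", ("Third-party model metadata catalog", "warn")),
  ("opencode.ai", ("opencode.ai servers — unexpected", "alert")),
  ("telemetry.opencode.ai", ("Telemetry endpoint — unexpected", "alert"))]

def pvRiskEmoji : PySem.Dict String String :=
  PySem.Dict.ofList [("ok", "✅"), ("warn", "⚠️"), ("alert", "🚨")]

def classify_domain (domain : String) : String × String :=
  (pvKnownDomains.get? domain).getD ("Unknown / unclassified", "alert")

-- ===== PORT A =====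
-- RISK_EMOJI[risk] is ported with getD "": classify_domain only ever returns risk ∈ {"ok","warn","alert"},
-- so the KeyError default is unreachable.
def section_header (log_lines : List String) (domains : List (String × String)) : List String :=
  let d := PySem.Dict.ofList domains
  let lines : List String := [
    "## Network Traffic",
    "",
    "Opencode contacted **" ++ PySem.Int.toStr (PySem.Dict.size d) ++ " unique domain(s)** during the test session.",
    "",
    "| Domain | Purpose | Status |",
    "|--------|---------|--------|"]
  let lines := (PySem.List.sorted (PySem.Dict.keys d) (fun x => x) false).foldl
    (fun acc domain =>
      let pr := classify_domain domain
      let emoji := (pvRiskEmoji.get? pr.2).getD ""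
      acc ++ ["| `" ++ domain ++ "` | " ++ pr.1 ++ " | " ++ emoji ++ " |"]) lines
  let get_c : Int := log_lines.foldl (fun acc l => if PySem.Str.startswith l "GET " then acc + 1 else acc) 0
  let post_c : Int := log_lines.foldl (fun acc l => if PySem.Str.startswith l "POST " then acc + 1 else acc) 0
  let con_c : Int := log_lines.foldl (fun acc l => if PySem.Str.startswith l "CONNECT " then acc + 1 else acc) 0
  let err_c : Int := log_lines.foldl (fun acc l => if PySem.Str.startswith l "ERROR " then acc + 1 else acc) 0
  lines ++ [
    "",
    "**Requests**: " ++ PySem.Int.toStr (PySem.List.len log_lines) ++ " total — " ++ PySem.Int.toStr get_c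
      ++ " GET, " ++ PySem.Int.toStr post_c ++ " POST, " ++ PySem.Int.toStr con_c ++ " CONNECT tunnels, "
      ++ PySem.Int.toStr err_c ++ " errors"]

-- ===== PORT B =====
def pvPrefixes : List String := ["GET ", "POST ", "CONNECT ", "ERROR "]

-- the inner 'for p in PREFIXES: if line.startswith(p): counts[p] += 1; break'
def pvBump (line : String) (counts : PySem.Dict String Int) : List String → PySem.Dict String Int
  | [] => counts
  | p :: ps =>
      if PySem.Str.startswith line p then counts.modify p 0 (· + 1) else pvBump line counts ps

def section_header_alt (log_lines : List String) (domains : List (String × String)) : List String :=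
  let counts := log_lines.foldl (fun c line => pvBump line c pvPrefixes)
    (PySem.Dict.ofList (pvPrefixes.map (fun p => (p, (0 : Int)))))
  let d := PySem.Dict.ofList domains
  let rows := (PySem.List.sorted (PySem.Dict.keys d) (fun x => x) false).map (fun domain =>
    let pr := classify_domain domain
    "| `" ++ domain ++ "` | " ++ pr.1 ++ " | " ++ (pvRiskEmoji.get? pr.2).getD "" ++ " |")
  "## Network Traffic" ::
  "" ::
  ("Opencode contacted **" ++ PySem.Int.toStr (PySem.Dict.size d) ++ " unique domain(s)** during the test session.") ::
  "" ::
  "| Domain | Purpose | Status |" ::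
  "|--------|---------|--------|" ::
  (rows ++ [
    "",
    "**Requests**: " ++ PySem.Int.toStr (PySem.List.len log_lines) ++ " total — "
      ++ PySem.Int.toStr (counts.getD "GET " 0) ++ " GET, " ++ PySem.Int.toStr (counts.getD "POST " 0)
      ++ " POST, " ++ PySem.Int.toStr (counts.getD "CONNECT " 0) ++ " CONNECT tunnels, "
      ++ PySem.Int.toStr (counts.getD "ERROR " 0) ++ " errors"])

-- ===== PRECONDITION & SPEC =====
def Spec_section_header (log_lines : List String) (domains : List (String × String)) (out : List String) : Prop := out = section_header_alt log_lines domains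
instance (log_lines : List String) (domains : List (String × String)) (out : List String) : Decidable (Spec_section_header log_lines domains out) := by unfold Spec_section_header; infer_instance

-- ===== CLAIM (what is proved, stated in full; the proofs are below) =====
def Claim_equal_section_header : Prop := ∀ (log_lines : List String) (domains : List (String × String)), Dom_section_header log_lines domains → Spec_section_header log_lines domains (section_header log_lines domains)

-- ===== LEMMAS AND PROOFS =====

-- two different ASCII request prefixes can never both be prefixes of the same line
theorem pvPrefix_excl {t p q : List Char} {a b : Char} (h : a ≠ b)
    (h1 : (a :: p) <+: t) : ¬ ((b :: q) <+: t) := by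
  rcases h1 with ⟨u, rfl⟩
  rintro ⟨v, hv⟩
  have : b = a := by
    have := congrArg (fun l => l.head?) hv
    simpa using this
  exact h this.symm

theorem pvSw_excl {a b : Char} {p q : List Char} {s1 s2 : String} (h : a ≠ b)
    (h1 : s1.toList = a :: p) (h2 : s2.toList = b :: q) {l : String}
    (hs : PySem.Str.startswith l s1 = true) : PySem.Str.startswith l s2 = false := by
  simp only [PySem.Str.startswith_eq] at *
  rw [PySem.Chars.startswith_iff, h1] at hs
  by_contra hb
  rw [Bool.not_eq_false, PySem.Chars.startswith_iff, h2] at hb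
  exact pvPrefix_excl h hs hb

theorem pvBump_getD (line : String) (c : PySem.Dict String Int) (p : String)
    (hp : p ∈ pvPrefixes) :
    (pvBump line c pvPrefixes).getD p 0
      = c.getD p 0 + (if PySem.Str.startswith line p then 1 else 0) := by
  have tG : ("GET " : String).toList = 'G' :: ['E', 'T', ' '] := rfl
  have tP : ("POST " : String).toList = 'P' :: ['O', 'S', 'T', ' '] := rfl
  have tC : ("CONNECT " : String).toList = 'C' :: ['O', 'N', 'N', 'E', 'C', 'T', ' '] := rfl
  have tE : ("ERROR " : String).toList = 'E' :: ['R', 'R', 'O', 'R', ' '] := rfl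
  simp only [pvPrefixes, List.mem_cons, List.not_mem_nil, or_false] at hp
  simp only [pvPrefixes, pvBump]
  by_cases h1 : PySem.Str.startswith line "GET "
  · have e2 := pvSw_excl (by decide) tG tP h1
    have e3 := pvSw_excl (by decide) tG tC h1
    have e4 := pvSw_excl (by decide) tG tE h1
    simp only [PySem.Str.startswith_eq, tG, tP, tC, tE] at h1 e2 e3 e4
    rcases hp with rfl | rfl | rfl | rfl <;> simp [h1, e2, e3, e4, PySem.Dict.getD_modify]
  · by_cases h2 : PySem.Str.startswith line "POST "
    · have e3 := pvSw_excl (by decide) tP tC h2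
      have e4 := pvSw_excl (by decide) tP tE h2
      simp only [PySem.Str.startswith_eq, tG, tP, tC, tE] at h1 h2 e3 e4
      rcases hp with rfl | rfl | rfl | rfl <;> simp [h1, h2, e3, e4, PySem.Dict.getD_modify]
    · by_cases h3 : PySem.Str.startswith line "CONNECT "
      · have e4 := pvSw_excl (by decide) tC tE h3
        simp only [PySem.Str.startswith_eq, tG, tP, tC, tE] at h1 h2 h3 e4
        rcases hp with rfl | rfl | rfl | rfl <;> simp [h1, h2, h3, e4, PySem.Dict.getD_modify]
      · simp only [PySem.Str.startswith_eq, tG, tP, tC] at h1 h2 h3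
        by_cases h4 : PySem.Chars.startswith line.toList ['E', 'R', 'R', 'O', 'R', ' '] <;>
          rcases hp with rfl | rfl | rfl | rfl <;> simp [h1, h2, h3, h4, PySem.Dict.getD_modify]

theorem pvFoldl_bump_getD (ls : List String) (c : PySem.Dict String Int) (p : String)
    (hp : p ∈ pvPrefixes) :
    (ls.foldl (fun c line => pvBump line c pvPrefixes) c).getD p 0
      = c.getD p 0 + (ls.countP (fun l => PySem.Str.startswith l p) : Int) := by
  induction ls generalizing c with
  | nil => simp
  | cons x xs ih =>
      simp only [List.foldl_cons, ih, pvBump_getD x c p hp, List.countP_cons]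
      split_ifs with h <;> push_cast <;> ring

-- ===== VERDICT (by name: the statement is the Claim_ definition above) =====
theorem section_header_spec : Claim_equal_section_header := by
  intro log_lines domains _
  unfold Spec_section_header section_header section_header_alt
  simp only [PySem.List.foldl_append_singleton_eq_map, PySem.List.foldl_if_add_one,
    pvFoldl_bump_getD _ _ _ (by decide : ("GET " : String) ∈ pvPrefixes),
    pvFoldl_bump_getD _ _ _ (by decide : ("POST " : String) ∈ pvPrefixes),
    pvFoldl_bump_getD _ _ _ (by decide : ("CONNECT " : String) ∈ pvPrefixes),
    pvFoldl_bump_getD _ _ _ (by decide : ("ERROR " : String) ∈ pvPrefixes)]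
  have i1 : (PySem.Dict.ofList (pvPrefixes.map (fun p => (p, (0 : Int))))).getD "GET " 0 = 0 := by decide
  have i2 : (PySem.Dict.ofList (pvPrefixes.map (fun p => (p, (0 : Int))))).getD "POST " 0 = 0 := by decide
  have i3 : (PySem.Dict.ofList (pvPrefixes.map (fun p => (p, (0 : Int))))).getD "CONNECT " 0 = 0 := by decide
  have i4 : (PySem.Dict.ofList (pvPrefixes.map (fun p => (p, (0 : Int))))).getD "ERROR " 0 = 0 := by decide
  norm_num [i1, i2, i3, i4]
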